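-- pv_equiv track=rewrite | github.com/orkandbeans/Discord-bot-for-320 | src/osrshighscores.py | constructcomparisonoutput
-- ===== SOURCE A (Python) =====
-- def constructcomparisonoutput(player_one_scores_list: list, player_two_scores_list: list, player_one: str, player_two: str):
--     output_list = []
--
--     j = 0
--     output_list.append("Scores:  " + player_one + "\n")
--     activity_index = 0
--     for i in player_one_scores_list:
--         if activity_index < 24:
--             output_list[j] += i[0] + ":   (" + player_one.upper() + ":   RANK:  " + i[1] + ",   LEVEL:  " + i[2] + ",   XP:  " + i[3] + "):  "
--             output_list[j] += "   (" + player_two.upper() + ":   RANK:  " + player_two_scores_list[activity_index][1] + ",   LEVEL:  " + player_two_scores_list[activity_index][2] + ",   XP:  " + player_two_scores_list[activity_index][3] + ")\n"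
--         else:
--             output_list[j] += i[0] + ":   (" + player_one.upper() + ":   RANK:  " + i[1] + ",   KC:  " + i[2] + "): "
--             output_list[j] += "   (" + player_two.upper() + ":   RANK:  " + player_two_scores_list[activity_index][1] + ",   KC:  " + player_two_scores_list[activity_index][2] + ")\n"
--         activity_index += 1
--         if(len(output_list[j]) > 1800):
--             j += 1
--             output_list.append("")
--     output_list[j] += "\n"
--     return output_list
-- ===== SOURCE B (Python) =====
-- def constructcomparisonoutput(player_one_scores_list: list, player_two_scores_list: list, player_one: str, player_two: str):
--     # Pass 1: format each comparison line from a data-driven label list.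
--     def block(name, row, labels):
--         return "(" + name.upper() + ":   " + ",   ".join(l + ":  " + row[1 + i] for i, l in enumerate(labels)) + ")"
--
--     lines = []
--     for idx, row in enumerate(player_one_scores_list):
--         labels = ["RANK", "LEVEL", "XP"] if idx < 24 else ["RANK", "KC"]
--         sep = ":  " if idx < 24 else ": "
--         lines.append(row[0] + ":   " + block(player_one, row, labels) + sep + "   "
--                      + block(player_two, player_two_scores_list[idx], labels) + "\n")
--
--     # Pass 2: compute how many lines go into each full chunk, from lengths alone.
--     header = "Scores:  " + player_one + "\n"
--     counts = []
--     acc = len(header)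
--     n = 0
--     for l in lines:
--         acc += len(l)
--         n += 1
--         if acc > 1800:
--             counts.append(n)
--             acc = 0
--             n = 0
--
--     # Pass 3: split the line list by those counts and join each group.
--     chunks = []
--     rest = lines
--     first = True
--     for c in counts:
--         chunks.append((header if first else "") + "".join(rest[:c]))
--         rest = rest[c:]
--         first = False
--     chunks.append((header if first else "") + "".join(rest) + "\n")
--     return chunks
-- ===== Notes on version B (the rewrite author's own statement) =====
-- stated objective: alternative
-- what changed: A builds chunks by mutating output_list[j] in place while formatting each row with two hard-coded string-concatenation branches; B formats rows from a data-driven label list joined with ', ', then computes how many lines fit per chunk from line lengths alone, and finally assembles each chunk by slicing the line list and joining each group.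
import Mathlib
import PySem

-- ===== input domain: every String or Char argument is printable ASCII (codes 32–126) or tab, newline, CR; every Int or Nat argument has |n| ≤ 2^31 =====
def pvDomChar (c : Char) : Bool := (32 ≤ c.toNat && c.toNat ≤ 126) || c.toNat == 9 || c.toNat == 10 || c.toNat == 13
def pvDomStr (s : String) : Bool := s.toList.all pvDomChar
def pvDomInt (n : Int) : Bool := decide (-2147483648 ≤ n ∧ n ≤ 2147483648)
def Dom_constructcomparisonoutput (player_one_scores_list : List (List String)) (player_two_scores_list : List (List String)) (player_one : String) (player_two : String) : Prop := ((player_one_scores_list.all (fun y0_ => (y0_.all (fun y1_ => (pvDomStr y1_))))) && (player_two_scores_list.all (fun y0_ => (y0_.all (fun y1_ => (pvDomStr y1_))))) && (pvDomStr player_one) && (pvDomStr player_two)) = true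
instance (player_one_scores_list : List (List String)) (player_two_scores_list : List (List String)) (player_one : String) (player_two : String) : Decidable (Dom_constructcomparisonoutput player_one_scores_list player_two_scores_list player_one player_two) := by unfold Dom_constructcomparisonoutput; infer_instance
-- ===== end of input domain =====

-- B replaces A's in-place chunk mutation with three passes: format each row from a
-- data-driven label list joined with ",   ", compute the number of lines per chunk from
-- line LENGTHS alone, then split the line list by those counts and join each group.
-- Objective: alternative (same cost); equivalence is about the RETURN value.

-- ===== PORT A =====
-- A's loop state: the list of chunks built so far, the index j of the chunk being extended,
-- and the activity_index counter k.  Row fields are read with getD "" — Python raises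
-- (IndexError) exactly where the field is missing, and Pre_ excludes those inputs.
def pvALoop (player_one player_two : String) (p2 : List (List String)) :
    List (List String) → List String → Nat → Nat → List String × Nat
  | [], ol, j, _ => (ol, j)
  | row :: rest, ol, j, k =>
    let q := p2.getD k []
    let cur :=
      if k < 24 then
        ((ol.getD j "") ++ (row.getD 0 "" ++ ":   (" ++ PySem.Str.upper player_one ++ ":   RANK:  " ++ row.getD 1 "" ++ ",   LEVEL:  " ++ row.getD 2 "" ++ ",   XP:  " ++ row.getD 3 "" ++ "):  "))
          ++ ("   (" ++ PySem.Str.upper player_two ++ ":   RANK:  " ++ q.getD 1 "" ++ ",   LEVEL:  " ++ q.getD 2 "" ++ ",   XP:  " ++ q.getD 3 "" ++ ")\n")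
      else
        ((ol.getD j "") ++ (row.getD 0 "" ++ ":   (" ++ PySem.Str.upper player_one ++ ":   RANK:  " ++ row.getD 1 "" ++ ",   KC:  " ++ row.getD 2 "" ++ "): "))
          ++ ("   (" ++ PySem.Str.upper player_two ++ ":   RANK:  " ++ q.getD 1 "" ++ ",   KC:  " ++ q.getD 2 "" ++ ")\n")
    let ol' := ol.set j cur
    if 1800 < PySem.Str.len cur then
      pvALoop player_one player_two p2 rest (ol' ++ [""]) (j + 1) (k + 1)
    else
      pvALoop player_one player_two p2 rest ol' j (k + 1)

def constructcomparisonoutput (player_one_scores_list : List (List String)) (player_two_scores_list : List (List String)) (player_one : String) (player_two : String) : List String :=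
  let st := pvALoop player_one player_two player_two_scores_list player_one_scores_list
      ["Scores:  " ++ player_one ++ "\n"] 0 0
  st.1.set st.2 ((st.1.getD st.2 "") ++ "\n")

-- ===== PORT B =====
-- Source B's block(): "(" + name.upper() + ":   " + ",   ".join(l + ":  " + row[1 + i] for i, l in enumerate(labels)) + ")"
-- (row[1 + i] read with pyGetD ""; Python raises IndexError there, Pre_ excludes those inputs)
def pvBlock (name : String) (row : List String) (labels : List String) : String :=
  "(" ++ PySem.Str.upper name ++ ":   " ++
    PySem.Str.join ",   " ((PySem.List.enumerate labels).map (fun p => p.2 ++ ":  " ++ PySem.List.pyGetD row (1 + p.1) "")) ++ ")"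

-- one iteration of Source B's `for idx, row in enumerate(...)` body (row[0] read with getD ""; Python raises there, Pre_ excludes it)
def pvBLine (player_one player_two : String) (p2 : List (List String)) (e : Int × List String) : String :=
  let labels := if e.1 < 24 then ["RANK", "LEVEL", "XP"] else ["RANK", "KC"]
  let sep := if e.1 < 24 then ":  " else ": "
  e.2.getD 0 "" ++ ":   " ++ pvBlock player_one e.2 labels ++ sep ++ "   " ++
    pvBlock player_two (PySem.List.pyGetD p2 e.1 []) labels ++ "\n"

-- Source B pass 2: how many lines go into each full chunk, from lengths alone
def pvCounts : Int → Nat → List String → List Nat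
  | _, _, [] => []
  | acc, n, l :: ls =>
    let acc' := acc + PySem.Str.len l
    let n' := n + 1
    if 1800 < acc' then n' :: pvCounts 0 0 ls else pvCounts acc' n' ls

-- Source B pass 3: split the line list by the counts and join each group (counts are
-- nonnegative line counts, so rest[:c] / rest[c:] are List.take / List.drop exactly)
def pvSplitJoin (header : String) : Bool → List String → List Nat → List String
  | first, rest, [] => [(if first then header else "") ++ PySem.Str.join "" rest ++ "\n"]
  | first, rest, c :: cs =>
    ((if first then header else "") ++ PySem.Str.join "" (rest.take c)) :: pvSplitJoin header false (rest.drop c) cs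

def constructcomparisonoutput_alt (player_one_scores_list : List (List String)) (player_two_scores_list : List (List String)) (player_one : String) (player_two : String) : List String :=
  let lines := (PySem.List.enumerate player_one_scores_list).map
    (pvBLine player_one player_two player_two_scores_list)
  let header := "Scores:  " ++ player_one ++ "\n"
  pvSplitJoin header true lines (pvCounts (PySem.Str.len header) 0 lines)

-- ===== PRECONDITION & SPEC =====
-- Pre_ excludes exactly the inputs where Python A raises IndexError: a row of player_two's
-- list missing for some activity index, or a row of either list with too few fields
-- (4 needed below index 24, 3 from index 24 on).
def Pre_constructcomparisonoutput (player_one_scores_list : List (List String)) (player_two_scores_list : List (List String)) (player_one : String) (player_two : String) : Prop :=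
  player_one_scores_list.length ≤ player_two_scores_list.length ∧
  ∀ k, k < player_one_scores_list.length →
    (if k < 24 then
      4 ≤ (player_one_scores_list.getD k []).length ∧ 4 ≤ (player_two_scores_list.getD k []).length
     else
      3 ≤ (player_one_scores_list.getD k []).length ∧ 3 ≤ (player_two_scores_list.getD k []).length)
instance (player_one_scores_list : List (List String)) (player_two_scores_list : List (List String)) (player_one : String) (player_two : String) : Decidable (Pre_constructcomparisonoutput player_one_scores_list player_two_scores_list player_one player_two) := by unfold Pre_constructcomparisonoutput; infer_instance

def pvWitness_constructcomparisonoutput : List (List String) × List (List String) × String × String :=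
  ([["Attack", "12", "99", "200000000"]], [["Attack", "40", "80", "1986068"]], "alice", "bob")

def Spec_constructcomparisonoutput (player_one_scores_list : List (List String)) (player_two_scores_list : List (List String)) (player_one : String) (player_two : String) (out : List String) : Prop := out = constructcomparisonoutput_alt player_one_scores_list player_two_scores_list player_one player_two
instance (player_one_scores_list : List (List String)) (player_two_scores_list : List (List String)) (player_one : String) (player_two : String) (out : List String) : Decidable (Spec_constructcomparisonoutput player_one_scores_list player_two_scores_list player_one player_two out) := by unfold Spec_constructcomparisonoutput; infer_instance

-- ===== CLAIM (what is proved, stated in full; the proofs are below) =====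
def Claim_equal_constructcomparisonoutput : Prop := ∀ (player_one_scores_list : List (List String)) (player_two_scores_list : List (List String)) (player_one : String) (player_two : String), Dom_constructcomparisonoutput player_one_scores_list player_two_scores_list player_one player_two → Pre_constructcomparisonoutput player_one_scores_list player_two_scores_list player_one player_two → Spec_constructcomparisonoutput player_one_scores_list player_two_scores_list player_one player_two (constructcomparisonoutput player_one_scores_list player_two_scores_list player_one player_two)

-- ===== LEMMAS AND PROOFS =====

-- proof-side intermediate: the fully formatted line of A's loop body at activity index k
def pvLine (p1u p2u : String) (k : Int) (row q : List String) : String :=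
  if k < 24 then
    row.getD 0 "" ++ ":   (" ++ p1u ++ ":   RANK:  " ++ row.getD 1 "" ++ ",   LEVEL:  " ++ row.getD 2 "" ++ ",   XP:  " ++ row.getD 3 "" ++ "):  "
      ++ "   (" ++ p2u ++ ":   RANK:  " ++ q.getD 1 "" ++ ",   LEVEL:  " ++ q.getD 2 "" ++ ",   XP:  " ++ q.getD 3 "" ++ ")\n"
  else
    row.getD 0 "" ++ ":   (" ++ p1u ++ ":   RANK:  " ++ row.getD 1 "" ++ ",   KC:  " ++ row.getD 2 "" ++ "): "
      ++ "   (" ++ p2u ++ ":   RANK:  " ++ q.getD 1 "" ++ ",   KC:  " ++ q.getD 2 "" ++ ")\n"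

-- proof-side intermediate: greedy packing of whole lines into chunks
def pvPack (chunks : List String) (current : String) : List String → List String
  | [] => chunks ++ [current ++ "\n"]
  | l :: ls =>
    let cur' := current ++ l
    if 1800 < PySem.Str.len cur' then pvPack (chunks ++ [cur']) "" ls
    else pvPack chunks cur' ls

theorem pv_set_last (chunks : List String) (cur v : String) :
    (chunks ++ [cur]).set chunks.length v = chunks ++ [v] := by
  simp

theorem pv_getD_last (chunks : List String) (cur : String) :
    (chunks ++ [cur]).getD chunks.length "" = cur := by
  simp [List.getD]

theorem pvALoop_eq_pvPack (p1n p2n : String) (p2 : List (List String)) :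
    ∀ (rows : List (List String)) (chunks : List String) (cur : String) (k : Nat),
      (let st := pvALoop p1n p2n p2 rows (chunks ++ [cur]) chunks.length k
       st.1.set st.2 ((st.1.getD st.2 "") ++ "\n"))
      = pvPack chunks cur
          ((PySem.List.enumerate rows (k : Int)).map
            (fun e => pvLine (PySem.Str.upper p1n) (PySem.Str.upper p2n) e.1 e.2
              (PySem.List.pyGetD p2 e.1 []))) := by
  intro rows
  induction rows with
  | nil =>
    intro chunks cur k
    simp [pvALoop, pvPack, PySem.List.enumerate]
  | cons row rest ih =>
    intro chunks cur k
    rw [PySem.List.enumerate_cons, List.map_cons]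
    simp only [pvALoop, pvPack, pv_getD_last, pv_set_last]
    have hidx : PySem.List.pyGetD p2 ((k : Int)) [] = p2.getD k [] := by
      rw [PySem.List.pyGetD_natCast]
    have hcast : ((k : Int)) + 1 = (((k + 1 : Nat)) : Int) := by push_cast; ring
    have hline : cur ++ pvLine (PySem.Str.upper p1n) (PySem.Str.upper p2n) ((k : Int)) row
        (PySem.List.pyGetD p2 ((k : Int)) []) =
        (if k < 24 then
          ((cur ++ (row.getD 0 "" ++ ":   (" ++ PySem.Str.upper p1n ++ ":   RANK:  " ++ row.getD 1 "" ++ ",   LEVEL:  " ++ row.getD 2 "" ++ ",   XP:  " ++ row.getD 3 "" ++ "):  "))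
            ++ ("   (" ++ PySem.Str.upper p2n ++ ":   RANK:  " ++ (p2.getD k []).getD 1 "" ++ ",   LEVEL:  " ++ (p2.getD k []).getD 2 "" ++ ",   XP:  " ++ (p2.getD k []).getD 3 "" ++ ")\n"))
         else
          ((cur ++ (row.getD 0 "" ++ ":   (" ++ PySem.Str.upper p1n ++ ":   RANK:  " ++ row.getD 1 "" ++ ",   KC:  " ++ row.getD 2 "" ++ "): "))
            ++ ("   (" ++ PySem.Str.upper p2n ++ ":   RANK:  " ++ (p2.getD k []).getD 1 "" ++ ",   KC:  " ++ (p2.getD k []).getD 2 "" ++ ")\n"))) := by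
      rw [hidx]
      unfold pvLine
      by_cases h : k < 24
      · have h' : ((k : Int)) < 24 := by exact_mod_cast h
        simp only [if_pos h, if_pos h']
        apply String.ext
        simp
      · have h' : ¬ ((k : Int)) < 24 := by exact_mod_cast h
        simp only [if_neg h, if_neg h']
        apply String.ext
        simp
    rw [← hline]
    by_cases hov : 1800 < PySem.Str.len (cur ++ pvLine (PySem.Str.upper p1n) (PySem.Str.upper p2n) ((k : Int)) row (PySem.List.pyGetD p2 ((k : Int)) []))
    · rw [if_pos hov, if_pos hov]
      have hlen : chunks.length + 1 = (chunks ++ [cur ++ pvLine (PySem.Str.upper p1n) (PySem.Str.upper p2n) ((k : Int)) row (PySem.List.pyGetD p2 ((k : Int)) [])]).length := by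
        simp
      rw [hlen]
      have := ih (chunks ++ [cur ++ pvLine (PySem.Str.upper p1n) (PySem.Str.upper p2n) ((k : Int)) row (PySem.List.pyGetD p2 ((k : Int)) [])]) "" (k + 1)
      rw [hcast]
      simpa only [List.append_assoc] using this
    · rw [if_neg hov, if_neg hov]
      have := ih chunks (cur ++ pvLine (PySem.Str.upper p1n) (PySem.Str.upper p2n) ((k : Int)) row (PySem.List.pyGetD p2 ((k : Int)) [])) (k + 1)
      rw [hcast]
      simpa only [List.append_assoc] using this

-- ""-join is plain concatenation
theorem pv_join0_nil : PySem.Str.join "" ([] : List String) = "" := by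
  apply String.ext; simp [PySem.Chars.join, List.intercalate]

theorem pv_join0_cons (x : String) (xs : List String) :
    PySem.Str.join "" (x :: xs) = x ++ PySem.Str.join "" xs := by
  apply String.ext
  cases xs with
  | nil => simp [PySem.Chars.join, List.intercalate]
  | cons y ys => simp [PySem.Chars.join, List.intercalate]

theorem pv_join0_append (xs ys : List String) :
    PySem.Str.join "" (xs ++ ys) = PySem.Str.join "" xs ++ PySem.Str.join "" ys := by
  induction xs with
  | nil => apply String.ext; simp [pv_join0_nil]
  | cons x xs ih =>
    rw [List.cons_append, pv_join0_cons, pv_join0_cons, ih]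
    apply String.ext; simp

-- pvSplitJoin with first = false forgets the header
def pvAux (cur : String) : List String → List Nat → List String
  | rest, [] => [cur ++ PySem.Str.join "" rest ++ "\n"]
  | rest, c :: cs => (cur ++ PySem.Str.join "" (rest.take c)) :: pvAux "" (rest.drop c) cs

theorem pvSplitJoin_false (header : String) :
    ∀ (cs : List Nat) (rest : List String),
      pvSplitJoin header false rest cs = pvAux "" rest cs := by
  intro cs
  induction cs with
  | nil => intro rest; simp [pvSplitJoin, pvAux]
  | cons c cs ih => intro rest; simp [pvSplitJoin, pvAux, ih]

theorem pvSplitJoin_true (header : String) (cs : List Nat) (rest : List String) :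
    pvSplitJoin header true rest cs = pvAux header rest cs := by
  cases cs with
  | nil => simp [pvSplitJoin, pvAux]
  | cons c cs => simp [pvSplitJoin, pvAux, pvSplitJoin_false]

-- greedy string packing = count computation + split/join assembly
theorem pvPack_eq_counts :
    ∀ (ls pre : List String) (cur0 : String) (chunks : List String),
      pvPack chunks (cur0 ++ PySem.Str.join "" pre) ls
        = chunks ++ pvAux cur0 (pre ++ ls)
            (pvCounts (PySem.Str.len (cur0 ++ PySem.Str.join "" pre)) pre.length ls) := by
  intro ls
  induction ls with
  | nil =>
    intro pre cur0 chunks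
    simp [pvPack, pvCounts, pvAux]
  | cons l ls ih =>
    intro pre cur0 chunks
    have hsnoc : cur0 ++ PySem.Str.join "" pre ++ l
        = cur0 ++ PySem.Str.join "" (pre ++ [l]) := by
      rw [pv_join0_append, pv_join0_cons, pv_join0_nil]
      apply String.ext; simp
    have hacc : PySem.Str.len (cur0 ++ PySem.Str.join "" pre) + PySem.Str.len l
        = PySem.Str.len (cur0 ++ PySem.Str.join "" (pre ++ [l])) := by
      rw [← hsnoc]; simp; ring
    simp only [pvPack, pvCounts, hsnoc, hacc]
    by_cases hov : 1800 < PySem.Str.len (cur0 ++ PySem.Str.join "" (pre ++ [l]))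
    · rw [if_pos hov, if_pos hov]
      have h0 := ih [] "" (chunks ++ [cur0 ++ PySem.Str.join "" pre ++ l])
      have hz : ("" : String) ++ PySem.Str.join "" ([] : List String) = "" := by
        apply String.ext; simp [pv_join0_nil]
      rw [hz, hsnoc] at h0
      rw [h0]
      have htake : (pre ++ l :: ls).take (pre.length + 1) = pre ++ [l] := by
        have : pre ++ l :: ls = (pre ++ [l]) ++ ls := by simp
        rw [this]
        rw [show pre.length + 1 = (pre ++ [l]).length by simp]
        exact List.take_left
      have hdrop : (pre ++ l :: ls).drop (pre.length + 1) = ls := by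
        have : pre ++ l :: ls = (pre ++ [l]) ++ ls := by simp
        rw [this]
        rw [show pre.length + 1 = (pre ++ [l]).length by simp]
        exact List.drop_left
      simp only [pvAux, htake, hdrop]
      simp
    · rw [if_neg hov, if_neg hov]
      rw [ih (pre ++ [l]) cur0 chunks]
      simp

theorem pv_exists4 {α : Type} (xs : List α) (h : 4 ≤ xs.length) :
    ∃ a b c d t, xs = a :: b :: c :: d :: t := by
  rcases xs with _ | ⟨a, _ | ⟨b, _ | ⟨c, _ | ⟨d, t⟩⟩⟩⟩ <;> simp at h <;> try omega
  exact ⟨a, b, c, d, t, rfl⟩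

theorem pv_exists3 {α : Type} (xs : List α) (h : 3 ≤ xs.length) :
    ∃ a b c t, xs = a :: b :: c :: t := by
  rcases xs with _ | ⟨a, _ | ⟨b, _ | ⟨c, t⟩⟩⟩ <;> simp at h <;> try omega
  exact ⟨a, b, c, t, rfl⟩

-- B's data-driven line equals A's literal line wherever the rows have enough fields
theorem pv_join3 (x y z : String) :
    PySem.Str.join ",   " [x, y, z] = x ++ ",   " ++ (y ++ (",   " ++ z)) := by
  apply String.ext; simp [PySem.Chars.join, List.intercalate]

theorem pv_join2 (x y : String) :
    PySem.Str.join ",   " [x, y] = x ++ ",   " ++ y := by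
  apply String.ext; simp [PySem.Chars.join, List.intercalate]

theorem pvBLine_eq_pvLine (n1 n2 : String) (p2 : List (List String)) (k : Nat) (row : List String)
    (h : if k < 24 then 4 ≤ row.length ∧ 4 ≤ (p2.getD k []).length
         else 3 ≤ row.length ∧ 3 ≤ (p2.getD k []).length) :
    pvBLine n1 n2 p2 ((k : Int), row)
      = pvLine (PySem.Str.upper n1) (PySem.Str.upper n2) (k : Int) row (PySem.List.pyGetD p2 (k : Int) []) := by
  have hb : ∀ (name a b c d : String) (t : List String),
      pvBlock name (a :: b :: c :: d :: t) ["RANK", "LEVEL", "XP"]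
        = "(" ++ PySem.Str.upper name ++ ":   RANK:  " ++ b ++ ",   LEVEL:  " ++ c ++ ",   XP:  " ++ d ++ ")" := by
    intro name a b c d t
    unfold pvBlock
    have h1 : PySem.List.pyGetD (a :: b :: c :: d :: t) (1 + (0 : Int)) "" = b := by simp [pysem]
    have h2 : PySem.List.pyGetD (a :: b :: c :: d :: t) (1 + (1 : Int)) "" = c := by simp [pysem]
    have h3 : PySem.List.pyGetD (a :: b :: c :: d :: t) (1 + (2 : Int)) "" = d := by simp [pysem]
    have he : PySem.List.enumerate ["RANK", "LEVEL", "XP"] = [((0 : Int), "RANK"), (1, "LEVEL"), (2, "XP")] := rfl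
    rw [he, List.map_cons, List.map_cons, List.map_cons, List.map_nil]
    simp only [h1, h2, h3]
    rw [pv_join3]
    apply String.ext; simp
  have hb2 : ∀ (name a b c : String) (t : List String),
      pvBlock name (a :: b :: c :: t) ["RANK", "KC"]
        = "(" ++ PySem.Str.upper name ++ ":   RANK:  " ++ b ++ ",   KC:  " ++ c ++ ")" := by
    intro name a b c t
    unfold pvBlock
    have h1 : PySem.List.pyGetD (a :: b :: c :: t) (1 + (0 : Int)) "" = b := by simp [pysem]
    have h2 : PySem.List.pyGetD (a :: b :: c :: t) (1 + (1 : Int)) "" = c := by simp [pysem]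
    have he : PySem.List.enumerate ["RANK", "KC"] = [((0 : Int), "RANK"), (1, "KC")] := rfl
    rw [he, List.map_cons, List.map_cons, List.map_nil]
    simp only [h1, h2]
    rw [pv_join2]
    apply String.ext; simp
  by_cases hk : k < 24
  · rw [if_pos hk] at h
    have hk' : ((k : Int)) < 24 := by exact_mod_cast hk
    obtain ⟨a, b, c, d, t, rfl⟩ := pv_exists4 row h.1
    obtain ⟨a', b', c', d', t', hq⟩ := pv_exists4 (p2.getD k []) h.2
    unfold pvBLine pvLine
    rw [PySem.List.pyGetD_natCast, hq]
    simp only [if_pos hk', hb]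
    apply String.ext; simp
  · rw [if_neg hk] at h
    have hk' : ¬ ((k : Int)) < 24 := by exact_mod_cast hk
    obtain ⟨a, b, c, t, rfl⟩ := pv_exists3 row h.1
    obtain ⟨a', b', c', t', hq⟩ := pv_exists3 (p2.getD k []) h.2
    unfold pvBLine pvLine
    rw [PySem.List.pyGetD_natCast, hq]
    simp only [if_neg hk', hb2]
    apply String.ext; simp

theorem pv_lines_eq (n1 n2 : String) (p2 : List (List String)) :
    ∀ (xs : List (List String)) (s : Nat),
      (∀ j, j < xs.length →
        (if s + j < 24 then 4 ≤ (xs.getD j []).length ∧ 4 ≤ (p2.getD (s + j) []).length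
         else 3 ≤ (xs.getD j []).length ∧ 3 ≤ (p2.getD (s + j) []).length)) →
      (PySem.List.enumerate xs (s : Int)).map (pvBLine n1 n2 p2)
        = (PySem.List.enumerate xs (s : Int)).map
            (fun e => pvLine (PySem.Str.upper n1) (PySem.Str.upper n2) e.1 e.2
              (PySem.List.pyGetD p2 e.1 [])) := by
  intro xs
  induction xs with
  | nil => intro s _; simp [PySem.List.enumerate]
  | cons row rest ih =>
    intro s h
    rw [PySem.List.enumerate_cons, List.map_cons, List.map_cons]
    have h0 := h 0 (by simp)
    simp only [Nat.add_zero, List.getD_cons_zero] at h0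
    have hhead := pvBLine_eq_pvLine n1 n2 p2 s row h0
    rw [hhead]
    have hcast : ((s : Int)) + 1 = (((s + 1 : Nat)) : Int) := by push_cast; ring
    rw [hcast, ih (s + 1) (by
      intro j hj
      have := h (j + 1) (by simpa using Nat.succ_lt_succ hj)
      simpa [Nat.add_assoc, Nat.add_comm 1 j] using this)]

-- ===== VERDICT (by name: the statement is the Claim_ definition above) =====
theorem constructcomparisonoutput_spec : Claim_equal_constructcomparisonoutput := by
  intro p1 p2 n1 n2 _hdom hpre
  unfold Spec_constructcomparisonoutput constructcomparisonoutput constructcomparisonoutput_alt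
  rw [pvSplitJoin_true]
  have hl := pv_lines_eq n1 n2 p2 p1 0 (by
    intro j hj
    simpa using hpre.2 j hj)
  simp only [Nat.cast_zero] at hl
  rw [hl]
  have hA := pvALoop_eq_pvPack n1 n2 p2 p1 [] ("Scores:  " ++ n1 ++ "\n") 0
  have hpk := pvPack_eq_counts
    ((PySem.List.enumerate p1 (0 : Int)).map
      (fun e => pvLine (PySem.Str.upper n1) (PySem.Str.upper n2) e.1 e.2
        (PySem.List.pyGetD p2 e.1 [])))
    [] ("Scores:  " ++ n1 ++ "\n") []
  have hz : ("Scores:  " ++ n1 ++ "\n") ++ PySem.Str.join "" ([] : List String)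
      = "Scores:  " ++ n1 ++ "\n" := by
    apply String.ext; simp [pv_join0_nil]
  rw [hz] at hpk
  simp only [List.nil_append, List.length_nil] at hpk
  simpa [hpk] using hA
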